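-- pv_equiv track=rewrite | github.com/sebastian-software/jasy | jasy/style/Util.py | combineSelectorList
-- ===== SOURCE A (Python) =====
-- import itertools, re
--
-- def combineSelectorList(selector, stop, root=None):
--     if not selector:
--         return None
--
--     if root is None:
--         root = [""]
--
--     combinedSelectors = []
--
--     for currentRoot in root:
--         for item in itertools.product(*reversed(selector)):
--             combined = ""
--             for part in item:
--                 # Keep root command separated by space
--                 if part == "@(root)":
--                     part += " "
--
--                 if combined:
--                     if "&" in part:
--                         if "@(root)" in combined:
--                             combined += currentRoot + part
--                         else:
--                             combined = part.replace("&", currentRoot+combined)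
--                     else:
--                         combined = "%s %s" % (combined, part)
--                 else:
--                     if "&" in part:
--                         if currentRoot:
--                             combined = part.replace("&", currentRoot)
--                         elif not stop:
--                             # Tolerate open/unsolvable "&" parent reference only when we stop early
--                             raise Exception("Can't merge selector %s - parent missing!" % part)
--                         else:
--                             combined = part
--                     else:
--                         combined = part
--
--             combinedSelectors.append(combined)
--
--     return combinedSelectors
-- ===== SOURCE B (Python) =====
-- def combineSelectorList(selector, stop, root=None):
--     # Depth-first recursion over the reversed selector lists, fusing the
--     # cartesian-product enumeration and the part-combination into one pass
--     # (no intermediate tuples); return value identical to the product version.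
--     if not selector:
--         return None
--
--     if root is None:
--         root = [""]
--
--     rev = list(reversed(selector))
--     if any(not parts for parts in rev):
--         # an empty factor makes the cartesian product empty
--         return []
--
--     def step(currentRoot, combined, part):
--         if part == "@(root)":
--             part += " "
--         if combined:
--             if "&" in part:
--                 if "@(root)" in combined:
--                     return combined + currentRoot + part
--                 return part.replace("&", currentRoot + combined)
--             return combined + " " + part
--         if "&" in part:
--             if currentRoot:
--                 return part.replace("&", currentRoot)
--             if not stop:
--                 raise Exception("Can't merge selector %s - parent missing!" % part)
--         return part
--
--     combinedSelectors = []
--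
--     def recurse(lists, combined, currentRoot):
--         if not lists:
--             combinedSelectors.append(combined)
--             return
--         for part in lists[0]:
--             recurse(lists[1:], step(currentRoot, combined, part), currentRoot)
--
--     for currentRoot in root:
--         recurse(rev, "", currentRoot)
--
--     return combinedSelectors
-- ===== Notes on version B (the rewrite author's own statement) =====
-- stated objective: alternative
-- what changed: Replaced the itertools.product tuple enumeration plus per-tuple fold with a depth-first recursion over the reversed selector lists that fuses enumeration and combination (no intermediate tuples), plus an explicit empty-factor early return.
import Mathlib
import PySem

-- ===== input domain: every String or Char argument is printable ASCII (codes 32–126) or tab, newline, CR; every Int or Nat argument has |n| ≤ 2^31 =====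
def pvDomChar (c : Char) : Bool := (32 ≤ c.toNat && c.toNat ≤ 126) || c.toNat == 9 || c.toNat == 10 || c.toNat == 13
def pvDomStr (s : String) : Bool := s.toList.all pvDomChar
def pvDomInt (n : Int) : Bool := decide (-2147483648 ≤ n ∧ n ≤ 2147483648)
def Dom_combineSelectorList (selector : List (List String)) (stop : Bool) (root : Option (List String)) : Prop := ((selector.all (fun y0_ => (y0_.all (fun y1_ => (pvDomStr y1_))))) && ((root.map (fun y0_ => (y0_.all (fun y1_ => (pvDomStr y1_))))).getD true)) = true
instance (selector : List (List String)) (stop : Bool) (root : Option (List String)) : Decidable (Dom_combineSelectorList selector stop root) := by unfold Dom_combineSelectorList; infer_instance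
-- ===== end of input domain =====

-- B fuses the cartesian-product enumeration and the part-combination of A into one
-- depth-first recursion over the reversed selector lists (no intermediate tuples);
-- objective: alternative decomposition, same return value.

-- ===== PORT A =====
-- itertools.product(*lists): first list varies slowest (recursion on the head).
def pvProd : List (List String) → List (List String)
  | [] => [[]]
  | l :: ls => l.flatMap (fun x => (pvProd ls).map (fun t => x :: t))

-- Port of A. A Python `raise` is modelled as `none` for the whole call.
def combineSelectorList (selector : List (List String)) (stop : Bool) (root : Option (List String)) : Option (List String) :=
  if selector = [] then none
  else
    (root.getD [""]).foldl (fun acc currentRoot =>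
      (pvProd selector.reverse).foldl (fun acc2 item =>
        acc2.bind fun outList =>
          (item.foldl (fun oc part0 =>
            oc.bind fun combined =>
              let part := if part0 = "@(root)" then part0 ++ " " else part0
              if combined ≠ "" then
                if PySem.Str.isIn "&" part then
                  if PySem.Str.isIn "@(root)" combined then some (combined ++ currentRoot ++ part)
                  else some (PySem.Str.replace part "&" (currentRoot ++ combined))
                else some (combined ++ " " ++ part)
              else
                if PySem.Str.isIn "&" part then
                  if currentRoot ≠ "" then some (PySem.Str.replace part "&" currentRoot)
                  else if stop = false then none   -- the `raise` branch
                  else some part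
                else some part) (some "")).map (fun c => outList ++ [c])) acc) (some [])

-- ===== PORT B =====
-- Source B's `step` helper (same combine logic; `none` = the raise).
def pvStepB (stop : Bool) (currentRoot : String) (combined : String) (part0 : String) : Option String :=
  let part := if part0 = "@(root)" then part0 ++ " " else part0
  if combined ≠ "" then
    if PySem.Str.isIn "&" part then
      if PySem.Str.isIn "@(root)" combined then some (combined ++ currentRoot ++ part)
      else some (PySem.Str.replace part "&" (currentRoot ++ combined))
    else some (combined ++ " " ++ part)
  else
    if PySem.Str.isIn "&" part then
      if currentRoot ≠ "" then some (PySem.Str.replace part "&" currentRoot)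
      else if stop = false then none
      else some part
    else some part

-- Source B's `recurse`: depth-first over the remaining lists; returns the leaves appended in order.
def pvRecurse (st : String → String → Option String) : List (List String) → String → Option (List String)
  | [], combined => some [combined]
  | l :: rest, combined =>
      l.foldl (fun acc part =>
        acc.bind fun outList =>
          ((st combined part).bind fun c => pvRecurse st rest c).map
            (fun leaves => outList ++ leaves)) (some [])

def combineSelectorList_alt (selector : List (List String)) (stop : Bool) (root : Option (List String)) : Option (List String) :=
  if selector = [] then none
  else if selector.reverse.any (fun l => l.isEmpty) then some []   -- empty factor: empty product
  else
    (root.getD [""]).foldl (fun acc currentRoot =>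
      acc.bind fun outList =>
        (pvRecurse (pvStepB stop currentRoot) selector.reverse "").map
          (fun leaves => outList ++ leaves)) (some [])

-- ===== PRECONDITION & SPEC =====
-- Python A raises ("parent missing") exactly when stop is False, the root list contains "",
-- all selector lists are nonempty (so the product is nonempty), and some tuple of the product
-- meets an '&'-part while the combined string is still empty (i.e. all earlier reversed lists
-- contain ""). pvRaiseShapeB states that last shape condition on the reversed selector.
def pvRaiseShapeB : List (List String) → Bool
  | [] => false
  | l :: rest => l.any (fun p => PySem.Str.isIn "&" p) || (l.contains "" && pvRaiseShapeB rest)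

-- Pre_ excludes exactly the inputs on which Python A raises Exception("… parent missing!").
def Pre_combineSelectorList (selector : List (List String)) (stop : Bool) (root : Option (List String)) : Prop :=
  ¬ (stop = false ∧ (root.getD [""]).contains "" = true ∧
     selector.all (fun l => !l.isEmpty) = true ∧ pvRaiseShapeB selector.reverse = true)

instance (selector : List (List String)) (stop : Bool) (root : Option (List String)) : Decidable (Pre_combineSelectorList selector stop root) := by unfold Pre_combineSelectorList; infer_instance

def pvWitness_combineSelectorList : List (List String) × Bool × Option (List String) :=
  ([["a"], ["&b", "c"]], false, some ["r"])

def Spec_combineSelectorList (selector : List (List String)) (stop : Bool) (root : Option (List String)) (out : Option (List String)) : Prop := out = combineSelectorList_alt selector stop root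
instance (selector : List (List String)) (stop : Bool) (root : Option (List String)) (out : Option (List String)) : Decidable (Spec_combineSelectorList selector stop root out) := by unfold Spec_combineSelectorList; infer_instance

-- ===== CLAIM (what is proved, stated in full; the proofs are below) =====
def Claim_equal_combineSelectorList : Prop := ∀ (selector : List (List String)) (stop : Bool) (root : Option (List String)), Dom_combineSelectorList selector stop root → Pre_combineSelectorList selector stop root → Spec_combineSelectorList selector stop root (combineSelectorList selector stop root)

-- ===== LEMMAS AND PROOFS =====

-- Proof-side abbreviations: the parts fold of A from an arbitrary start …
def pvFpf (st : String → String → Option String) (c0 : String) (it : List String) : Option String :=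
  it.foldl (fun oc p => oc.bind fun c => st c p) (some c0)

-- … and the "sequence of results" combinators the two loop shapes both reduce to.
def pvMM (h : List String → Option String) : List (List String) → Option (List String)
  | [] => some []
  | it :: ts => (h it).bind fun c => (pvMM h ts).map (fun l => c :: l)

def pvMML {α : Type} (h : α → Option (List String)) : List α → Option (List String)
  | [] => some []
  | x :: xs => (h x).bind fun ys => (pvMML h xs).map (fun l => ys ++ l)

theorem pvFpf_none (st : String → String → Option String) (it : List String) :
    it.foldl (fun oc p => oc.bind fun c => st c p) none = none := by
  induction it with
  | nil => rfl
  | cons x t ih => simpa using ih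

theorem pvFpf_cons (st : String → String → Option String) (c0 x : String) (t : List String) :
    pvFpf st c0 (x :: t) = (st c0 x).bind fun c => pvFpf st c t := by
  cases h : st c0 x with
  | none => simp [pvFpf, h, pvFpf_none]
  | some c => simp [pvFpf, h]

theorem pvFoldS_none (h : List String → Option String) (ts : List (List String)) :
    ts.foldl (fun acc it => acc.bind fun outList => (h it).map (fun c => outList ++ [c])) none = none := by
  induction ts with
  | nil => rfl
  | cons a t ih => simpa using ih

theorem pvFoldS_some (h : List String → Option String) (ts : List (List String)) (out0 : List String) :
    ts.foldl (fun acc it => acc.bind fun outList => (h it).map (fun c => outList ++ [c])) (some out0)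
      = (pvMM h ts).map (fun l => out0 ++ l) := by
  induction ts generalizing out0 with
  | nil => simp [pvMM]
  | cons a t ih =>
    cases hha : h a with
    | none => simp [pvMM, hha, pvFoldS_none]
    | some c => simp [pvMM, hha, ih, Function.comp_def]

theorem pvFoldL_none {α : Type} (h : α → Option (List String)) (xs : List α) :
    xs.foldl (fun acc x => acc.bind fun outList => (h x).map (fun leaves => outList ++ leaves)) none = none := by
  induction xs with
  | nil => rfl
  | cons a t ih => simpa using ih

theorem pvFoldL_some {α : Type} (h : α → Option (List String)) (xs : List α) (out0 : List String) :
    xs.foldl (fun acc x => acc.bind fun outList => (h x).map (fun leaves => outList ++ leaves)) (some out0)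
      = (pvMML h xs).map (fun l => out0 ++ l) := by
  induction xs generalizing out0 with
  | nil => simp [pvMML]
  | cons a t ih =>
    cases hha : h a with
    | none => simp [pvMML, hha, pvFoldL_none]
    | some ys => simp [pvMML, hha, ih, Function.comp_def]

theorem pvMM_congr (h h' : List String → Option String) (ts : List (List String))
    (he : ∀ t ∈ ts, h t = h' t) : pvMM h ts = pvMM h' ts := by
  induction ts with
  | nil => rfl
  | cons a t ih =>
    simp only [pvMM, he a (by simp)]
    rw [ih (fun t ht => he t (by simp [ht]))]

theorem pvMM_mapped (h : List String → Option String) (f : List String → List String) (ts : List (List String)) :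
    pvMM h (ts.map f) = pvMM (fun t => h (f t)) ts := by
  induction ts with
  | nil => rfl
  | cons a t ih => simp [pvMM, ih]

theorem pvMM_flatMap {α : Type} (h : List String → Option String) (M : α → List (List String)) (l : List α) :
    pvMM h (l.flatMap M) = pvMML (fun x => pvMM h (M x)) l := by
  induction l with
  | nil => rfl
  | cons a t ih =>
    have happ : ∀ (u v : List (List String)),
        pvMM h (u ++ v) = (pvMM h u).bind fun xs => (pvMM h v).map (fun l => xs ++ l) := by
      intro u v
      induction u with
      | nil => cases hv : pvMM h v <;> simp [pvMM, hv]
      | cons b s ihu =>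
        cases hb : h b with
        | none => simp [pvMM, hb]
        | some c =>
          simp only [List.cons_append, pvMM, hb, ihu]
          cases pvMM h s <;> cases pvMM h v <;> simp
  
    simp only [List.flatMap_cons, happ, ih, pvMML]

theorem pvProd_ne_nil (ls : List (List String)) (hne : ∀ l ∈ ls, l ≠ []) : pvProd ls ≠ [] := by
  induction ls with
  | nil => simp [pvProd]
  | cons a t ih =>
    have ha : a ≠ [] := hne a (by simp)
    have ht : pvProd t ≠ [] := ih (fun l hl => hne l (by simp [hl]))
    cases a with
    | nil => exact absurd rfl ha
    | cons x xs =>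
      cases hp : pvProd t with
      | nil => exact absurd hp ht
      | cons u us => simp [pvProd, hp]

theorem pvProd_nil_of_mem (ls : List (List String)) (hmem : [] ∈ ls) : pvProd ls = [] := by
  induction ls with
  | nil => simp at hmem
  | cons a t ih =>
    rcases List.mem_cons.mp hmem with h | h
    · simp [pvProd, ← h]
    · simp [pvProd, ih h]

theorem pvMM_cons_factor (st : String → String → Option String) (c0 x : String)
    (ts : List (List String)) (hts : ts ≠ []) :
    pvMM (pvFpf st c0) (ts.map (fun t => x :: t)) = (st c0 x).bind fun c => pvMM (pvFpf st c) ts := by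
  rw [pvMM_mapped]
  cases hsx : st c0 x with
  | none =>
    cases ts with
    | nil => exact absurd rfl hts
    | cons u us => simp [pvMM, pvFpf_cons, hsx]
  | some c =>
    simp only [Option.bind_some]
    exact pvMM_congr _ _ ts (fun t _ => by rw [pvFpf_cons, hsx, Option.bind_some])

theorem pvRecurse_eq (st : String → String → Option String) (ls : List (List String))
    (hne : ∀ l ∈ ls, l ≠ []) (c0 : String) :
    pvRecurse st ls c0 = pvMM (pvFpf st c0) (pvProd ls) := by
  induction ls generalizing c0 with
  | nil => simp [pvRecurse, pvProd, pvMM, pvFpf]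
  | cons l rest ih =>
    have hner : ∀ l' ∈ rest, l' ≠ [] := fun l' hl' => hne l' (by simp [hl'])
    have hprodne : pvProd rest ≠ [] := pvProd_ne_nil rest hner
    have hbody : ∀ part : String,
        ((st c0 part).bind fun c => pvRecurse st rest c)
          = pvMM (pvFpf st c0) ((pvProd rest).map (fun t => part :: t)) := by
      intro part
      rw [pvMM_cons_factor st c0 part _ hprodne]
      cases hsx : st c0 part with
      | none => simp
      | some c => simp [ih hner c]
    show l.foldl (fun acc part => acc.bind fun outList =>
          ((st c0 part).bind fun c => pvRecurse st rest c).map (fun leaves => outList ++ leaves)) (some [])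
        = pvMM (pvFpf st c0) (pvProd (l :: rest))
    calc l.foldl (fun acc part => acc.bind fun outList =>
            ((st c0 part).bind fun c => pvRecurse st rest c).map (fun leaves => outList ++ leaves)) (some [])
        = l.foldl (fun acc part => acc.bind fun outList =>
            (pvMM (pvFpf st c0) ((pvProd rest).map (fun t => part :: t))).map (fun leaves => outList ++ leaves)) (some []) := by
          simp only [hbody]
      _ = (pvMML (fun part => pvMM (pvFpf st c0) ((pvProd rest).map (fun t => part :: t))) l).map (fun l => [] ++ l) := by
          exact pvFoldL_some _ l []
      _ = pvMM (pvFpf st c0) (pvProd (l :: rest)) := by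
          rw [show pvProd (l :: rest) = l.flatMap (fun x => (pvProd rest).map (fun t => x :: t)) from rfl,
              pvMM_flatMap]
          simp

-- A's inner parts fold is pvFpf of pvStepB (definitional).
theorem pvInnerA_eq (stop : Bool) (currentRoot : String) (item : List String) :
    item.foldl (fun oc part0 =>
      oc.bind fun combined =>
        let part := if part0 = "@(root)" then part0 ++ " " else part0
        if combined ≠ "" then
          if PySem.Str.isIn "&" part then
            if PySem.Str.isIn "@(root)" combined then some (combined ++ currentRoot ++ part)
            else some (PySem.Str.replace part "&" (currentRoot ++ combined))
          else some (combined ++ " " ++ part)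
        else
          if PySem.Str.isIn "&" part then
            if currentRoot ≠ "" then some (PySem.Str.replace part "&" currentRoot)
            else if stop = false then none
            else some part
          else some part) (some "")
      = pvFpf (pvStepB stop currentRoot) "" item := rfl

theorem pvFoldl_id {α β : Type} (l : List α) (a : β) : l.foldl (fun acc _ => acc) a = a := by
  induction l generalizing a with
  | nil => rfl
  | cons x t ih => exact ih a

-- ===== VERDICT (by name: the statement is the Claim_ definition above) =====
theorem combineSelectorList_spec : Claim_equal_combineSelectorList := by
  intro selector stop root _ _
  unfold Spec_combineSelectorList combineSelectorList combineSelectorList_alt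
  by_cases hsel : selector = []
  · simp [hsel]
  · simp only [if_neg hsel]
    by_cases hemp : selector.reverse.any (fun l => l.isEmpty) = true
    · -- some factor is empty: the product is empty, both sides give some []
      rw [if_pos hemp]
      rcases List.any_eq_true.mp hemp with ⟨l, hl, hle⟩
      have : pvProd selector.reverse = [] := by
        apply pvProd_nil_of_mem
        rwa [List.isEmpty_iff.mp hle] at hl
      rw [this]
      simp only [List.foldl_nil]
      rw [pvFoldl_id]
    · rw [if_neg hemp]
      have hne : ∀ l ∈ selector.reverse, l ≠ [] := by
        intro l hl hcon
        exact hemp (List.any_eq_true.mpr ⟨l, hl, by simp [hcon]⟩)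
      have hfun : (fun (acc : Option (List String)) currentRoot =>
          (pvProd selector.reverse).foldl (fun acc2 item =>
            acc2.bind fun outList =>
              (item.foldl (fun oc part0 =>
                oc.bind fun combined =>
                  let part := if part0 = "@(root)" then part0 ++ " " else part0
                  if combined ≠ "" then
                    if PySem.Str.isIn "&" part then
                      if PySem.Str.isIn "@(root)" combined then some (combined ++ currentRoot ++ part)
                      else some (PySem.Str.replace part "&" (currentRoot ++ combined))
                    else some (combined ++ " " ++ part)
                  else
                    if PySem.Str.isIn "&" part then
                      if currentRoot ≠ "" then some (PySem.Str.replace part "&" currentRoot)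
                      else if stop = false then none
                      else some part
                    else some part) (some "")).map (fun c => outList ++ [c])) acc)
        = (fun (acc : Option (List String)) currentRoot =>
            acc.bind fun outList =>
              (pvRecurse (pvStepB stop currentRoot) selector.reverse "").map
                (fun leaves => outList ++ leaves)) := by
        funext acc currentRoot
        have h1 : ∀ item, (item.foldl (fun oc part0 =>
            oc.bind fun combined =>
              let part := if part0 = "@(root)" then part0 ++ " " else part0
              if combined ≠ "" then
                if PySem.Str.isIn "&" part then
                  if PySem.Str.isIn "@(root)" combined then some (combined ++ currentRoot ++ part)
                  else some (PySem.Str.replace part "&" (currentRoot ++ combined))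
                else some (combined ++ " " ++ part)
              else
                if PySem.Str.isIn "&" part then
                  if currentRoot ≠ "" then some (PySem.Str.replace part "&" currentRoot)
                  else if stop = false then none
                  else some part
                else some part) (some "")) = pvFpf (pvStepB stop currentRoot) "" item :=
          pvInnerA_eq stop currentRoot
        simp only [h1]
        rw [pvRecurse_eq (pvStepB stop currentRoot) selector.reverse hne ""]
        cases acc with
        | none => exact pvFoldS_none _ _
        | some out0 => rw [pvFoldS_some]; rfl
      rw [hfun]
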